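-- pv_equiv track=rewrite | github.com/Don-Nadie-Lab/ToolKinventario | app/barcode.py | validar_codigo_barras
-- ===== SOURCE A (Python) =====
-- def validar_codigo_barras(codigo):
--     """
--     Valida si un código de barras tiene un formato válido
--
--     Args:
--         codigo: Código de barras a validar
--
--     Returns:
--         bool: True si es válido, False en caso contrario
--     """
--     if not codigo:
--         return False
--
--     # Eliminar espacios en blanco
--     codigo = codigo.strip()
--
--     # Verificar longitud mínima
--     if len(codigo) < 4:
--         return False
--
--     # Verificar que contenga solo caracteres alfanuméricos y algunos símbolos permitidos
--     caracteres_permitidos = set('0123456789ABCDEFGHIJKLMNOPQRSTUVWXYZabcdefghijklmnopqrstuvwxyz-_.')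
--     if not all(c in caracteres_permitidos for c in codigo):
--         return False
--
--     return True
-- ===== SOURCE B (Python) =====
-- import re
--
-- _PATRON = re.compile(r'[0-9A-Za-z._-]{4,}')
--
--
-- def validar_codigo_barras(codigo):
--     """
--     Valida si un código de barras tiene un formato válido
--     (misma semántica que A: guardia por vacío, strip, longitud >= 4,
--     solo alfanuméricos y '-', '_', '.')
--     """
--     if not codigo:
--         return False
--     return bool(_PATRON.fullmatch(codigo.strip()))
-- ===== Notes on version B (the rewrite author's own statement) =====
-- stated objective: idiomatic
-- what changed: The explicit length check and the per-character all(...in set) loop are replaced by a single precompiled re.fullmatch of [0-9A-Za-z._-]{4,}: the quantifier encodes the length floor and the character class the allowed set.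
import Mathlib
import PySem

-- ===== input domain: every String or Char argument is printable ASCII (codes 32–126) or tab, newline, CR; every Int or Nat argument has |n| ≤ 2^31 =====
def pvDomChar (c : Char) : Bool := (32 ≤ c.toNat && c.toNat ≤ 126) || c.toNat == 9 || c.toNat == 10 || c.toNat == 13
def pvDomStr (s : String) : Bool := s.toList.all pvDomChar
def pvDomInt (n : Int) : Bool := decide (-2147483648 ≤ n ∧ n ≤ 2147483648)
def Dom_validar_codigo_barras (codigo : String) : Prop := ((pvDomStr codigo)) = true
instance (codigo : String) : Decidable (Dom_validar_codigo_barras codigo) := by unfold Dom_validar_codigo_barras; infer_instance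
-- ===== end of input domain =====

-- B replaces A's separate length check and character-set loop by a single regex fullmatch
-- of [0-9A-Za-z._-]{4,} (ported by hand below, exactly); objective: idiomatic.

-- ===== PORT A =====
-- caracteres_permitidos = set('0123…-_.')
def pvCaracteresPermitidos : PySem.Set Char :=
  PySem.Set.ofList "0123456789ABCDEFGHIJKLMNOPQRSTUVWXYZabcdefghijklmnopqrstuvwxyz-_.".toList

def validar_codigo_barras (codigo : String) : Bool :=
  if codigo == "" then false                 -- if not codigo: return False
  else
    let codigo := PySem.Str.strip codigo     -- codigo = codigo.strip()
    if PySem.Str.len codigo < 4 then false   -- if len(codigo) < 4: return False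
    else if !(codigo.toList.all (fun c => pvCaracteresPermitidos.contains c)) then false
                                             -- if not all(c in caracteres_permitidos for c in codigo): return False
    else true

-- ===== PORT B =====
-- the regex character class [0-9A-Za-z._-] on one character (literals '.', '_', '-'); exact
def pvClaseB (c : Char) : Bool :=
  ('0' ≤ c && c ≤ '9') || ('A' ≤ c && c ≤ 'Z') || ('a' ≤ c && c ≤ 'z') || c == '.' || c == '_' || c == '-'

-- _PATRON.fullmatch(s) for the pattern [0-9A-Za-z._-]{4,}, ported by hand (no regex engine in
-- PySem): the whole string matches the class repeated at least 4 times, i.e. every character is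
-- in the class and the length is ≥ 4; exact for this pattern
def pvFullmatchClase4 (s : List Char) : Bool :=
  decide (4 ≤ s.length) && s.all pvClaseB

def validar_codigo_barras_alt (codigo : String) : Bool :=
  if codigo == "" then false                 -- if not codigo: return False
  else pvFullmatchClase4 (PySem.Str.strip codigo).toList
                                             -- return bool(_PATRON.fullmatch(codigo.strip()))

-- ===== PRECONDITION & SPEC =====
def Spec_validar_codigo_barras (codigo : String) (out : Bool) : Prop := out = validar_codigo_barras_alt codigo
instance (codigo : String) (out : Bool) : Decidable (Spec_validar_codigo_barras codigo out) := by unfold Spec_validar_codigo_barras; infer_instance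

-- ===== CLAIM (what is proved, stated in full; the proofs are below) =====
def Claim_equal_validar_codigo_barras : Prop := ∀ (codigo : String), Dom_validar_codigo_barras codigo → Spec_validar_codigo_barras codigo (validar_codigo_barras codigo)

-- ===== LEMMAS AND PROOFS =====

-- membership in A's allowed set coincides with B's character class, for every character
set_option maxRecDepth 10000 in
theorem pv_contains_eq_clase (c : Char) :
    PySem.Set.contains pvCaracteresPermitidos c = pvClaseB c := by
  have h : pvCaracteresPermitidos = ['0', '1', '2', '3', '4', '5', '6', '7', '8', '9', 'A', 'B', 'C', 'D', 'E', 'F', 'G', 'H', 'I', 'J', 'K', 'L', 'M', 'N', 'O', 'P', 'Q', 'R', 'S', 'T', 'U', 'V', 'W', 'X', 'Y', 'Z', 'a', 'b', 'c', 'd', 'e', 'f', 'g', 'h', 'i', 'j', 'k', 'l', 'm', 'n', 'o', 'p', 'q', 'r', 's', 't', 'u', 'v', 'w', 'x', 'y', 'z', '-', '_', '.'] := by decide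
  have key : ∀ d : Char, (c == d) = decide (c.toNat = d.toNat) := by
    intro d
    by_cases he : c.toNat = d.toNat
    · have hcd : c = d := Char.ext (UInt32.toNat_inj.mp he)
      simp [hcd]
    · have hcd : c ≠ d := fun hq => he (hq ▸ rfl)
      simp [hcd, he]
  rw [h]
  simp only [PySem.Set.contains, List.contains_cons, List.contains_nil, Bool.or_false,
    pvClaseB, Char.le_def, UInt32.le_iff_toNat_le, key]
  rw [Bool.eq_iff_iff]
  simp only [Bool.or_eq_true, Bool.and_eq_true, decide_eq_true_eq]
  simp only [Char.toNat, show ('0':Char).val.toNat = 48 from rfl, show ('1':Char).val.toNat = 49 from rfl, show ('2':Char).val.toNat = 50 from rfl, show ('3':Char).val.toNat = 51 from rfl, show ('4':Char).val.toNat = 52 from rfl, show ('5':Char).val.toNat = 53 from rfl, show ('6':Char).val.toNat = 54 from rfl, show ('7':Char).val.toNat = 55 from rfl, show ('8':Char).val.toNat = 56 from rfl, show ('9':Char).val.toNat = 57 from rfl, show ('A':Char).val.toNat = 65 from rfl, show ('B':Char).val.toNat = 66 from rfl, show ('C':Char).val.toNat = 67 from rfl, show ('D':Char).val.toNat = 68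 from rfl, show ('E':Char).val.toNat = 69 from rfl, show ('F':Char).val.toNat = 70 from rfl, show ('G':Char).val.toNat = 71 from rfl, show ('H':Char).val.toNat = 72 from rfl, show ('I':Char).val.toNat = 73 from rfl, show ('J':Char).val.toNat = 74 from rfl, show ('K':Char).val.toNat = 75 from rfl, show ('L':Char).val.toNat = 76 from rfl, show ('M':Char).val.toNat = 77 from rfl, show ('N':Char).val.toNat = 78 from rfl, show ('O':Char).val.toNat = 79 from rfl, show ('P':Char).val.toNat = 80 from rfl, show ('Q':Char).val.toNat = 81 from rfl, show ('R':Char).val.toNat = 82 from rfl, show ('S':Char).val.toNat = 83 from rfl, show ('T':Char).val.toNat = 84 from rfl, show ('U':Char).val.toNat = 85 from rfl, show ('V':Char).val.toNat = 86 from rfl, show ('W':Char).val.toNat = 87 from rfl, show ('X':Char).val.toNat = 88 from rfl, show ('Y':Char).val.toNat = 89 from rfl, show ('Z':Char).val.toNat = 90 from rfl, show ('a':Char).val.toNat = 97 from rfl, show ('b':Char).val.toNat = 98 from rfl, show ('c':Char).val.toNat = 99 from rfl, show ('d':Char).val.toNat = 100 from rfl, show ('e':Char).val.toNat = 101 from rfl,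 show ('f':Char).val.toNat = 102 from rfl, show ('g':Char).val.toNat = 103 from rfl, show ('h':Char).val.toNat = 104 from rfl, show ('i':Char).val.toNat = 105 from rfl, show ('j':Char).val.toNat = 106 from rfl, show ('k':Char).val.toNat = 107 from rfl, show ('l':Char).val.toNat = 108 from rfl, show ('m':Char).val.toNat = 109 from rfl, show ('n':Char).val.toNat = 110 from rfl, show ('o':Char).val.toNat = 111 from rfl, show ('p':Char).val.toNat = 112 from rfl, show ('q':Char).val.toNat = 113 from rfl, show ('r':Char).val.toNat = 114 from rfl, show ('s':Char).val.toNat = 115 from rfl, show ('t':Char).val.toNat = 116 from rfl, show ('u':Char).val.toNat = 117 from rfl, show ('v':Char).val.toNat = 118 from rfl, show ('w':Char).val.toNat = 119 from rfl, show ('x':Char).val.toNat = 120 from rfl, show ('y':Char).val.toNat = 121 from rfl, show ('z':Char).val.toNat = 122 from rfl, show ('-':Char).val.toNat = 45 from rfl, show ('_':Char).val.toNat = 95 from rfl, show ('.':Char).val.toNat = 46 from rfl]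
  omega

-- ===== VERDICT (by name: the statement is the Claim_ definition above) =====
theorem validar_codigo_barras_spec : Claim_equal_validar_codigo_barras := by
  intro codigo _
  unfold Spec_validar_codigo_barras validar_codigo_barras validar_codigo_barras_alt
  cases hc : (codigo == "") with
  | true => simp
  | false =>
    simp only [Bool.false_eq_true, if_false]
    simp only [pvFullmatchClase4, PySem.Str.len_eq, pv_contains_eq_clase]
    generalize (PySem.Str.strip codigo).toList = l
    by_cases hlen : (l.length : Int) < 4
    · simp [hlen, show ¬ (4 ≤ l.length) by omega]
    · simp only [hlen, if_false]
      have h4 : 4 ≤ l.length := by omega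
      by_cases hall2 : l.all pvClaseB <;> simp [hall2, h4]
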